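-- pv_equiv track=rewrite | github.com/evidencebp/pylint-intervention | data/in_the_wild/versions/pyradio/700b77b8b677e74ffcca29fab2f3506dc6e79d2b/before/pyradio_slash_radio.py | _replace_starting_undesscore
-- ===== SOURCE A (Python) =====
-- def _replace_starting_undesscore(a_string):
--     ret = ''
--     for i, ch in enumerate(a_string):
--         if ch == '_':
--             ret += ' '
--         else:
--             ret += a_string[i:]
--             break
--     return ret
-- ===== SOURCE B (Python) =====
-- def _replace_starting_undesscore(a_string):
--     stripped = a_string.lstrip('_')
--     n = len(a_string) - len(stripped)
--     return ' ' * n + stripped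
-- ===== Notes on version B (the rewrite author's own statement) =====
-- stated objective: simpler
-- what changed: Replaces the indexed per-character loop with early break by a closed-form count-then-build: lstrip('_') gives the tail, the length difference gives the number of leading underscores, and the result is ' '*n + stripped.
import Mathlib
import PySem

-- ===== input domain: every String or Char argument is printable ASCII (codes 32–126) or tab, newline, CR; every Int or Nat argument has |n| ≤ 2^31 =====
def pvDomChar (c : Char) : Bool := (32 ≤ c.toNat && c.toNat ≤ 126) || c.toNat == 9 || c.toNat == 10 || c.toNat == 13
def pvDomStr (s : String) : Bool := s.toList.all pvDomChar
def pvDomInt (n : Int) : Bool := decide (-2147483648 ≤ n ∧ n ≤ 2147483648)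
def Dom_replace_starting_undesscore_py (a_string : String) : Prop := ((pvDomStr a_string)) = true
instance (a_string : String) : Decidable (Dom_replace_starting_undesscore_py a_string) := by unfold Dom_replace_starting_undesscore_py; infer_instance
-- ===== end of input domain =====

-- B replaces A's indexed scan-with-break by a closed-form count-then-build (lstrip, length difference, replicate); objective: simpler.


-- ===== PORT A =====
-- the enumerate loop with break: state is (remaining chars, index i, accumulator ret);
-- a_string[i:] with 0 ≤ i ≤ len is exactly List.drop i on the characters
def pvALoop (full : List Char) : List Char → Nat → List Char → List Char
  | [], _, ret => ret
  | c :: rest, i, ret =>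
    if c = '_' then pvALoop full rest (i + 1) (ret ++ [' '])
    else ret ++ full.drop i   -- ret += a_string[i:]; break

def replace_starting_undesscore_py (a_string : String) : String :=
  String.mk (pvALoop a_string.toList a_string.toList 0 [])

-- ===== PORT B =====
def replace_starting_undesscore_py_alt (a_string : String) : String :=
  let stripped := a_string.toList.dropWhile (· == '_')   -- a_string.lstrip('_')
  let n := a_string.toList.length - stripped.length      -- len(a_string) - len(stripped)
  String.mk (List.replicate n ' ' ++ stripped)           -- ' ' * n + stripped

-- ===== PRECONDITION & SPEC =====
def Spec_replace_starting_undesscore_py (a_string : String) (out : String) : Prop := out = replace_starting_undesscore_py_alt a_string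
instance (a_string : String) (out : String) : Decidable (Spec_replace_starting_undesscore_py a_string out) := by unfold Spec_replace_starting_undesscore_py; infer_instance

-- ===== CLAIM (what is proved, stated in full; the proofs are below) =====
def Claim_equal_replace_starting_undesscore_py : Prop := ∀ (a_string : String), Dom_replace_starting_undesscore_py a_string → Spec_replace_starting_undesscore_py a_string (replace_starting_undesscore_py a_string)

-- ===== LEMMAS AND PROOFS =====

lemma pvALoop_eq (full : List Char) :
    ∀ (l : List Char) (i : Nat) (ret : List Char), full.drop i = l →
      pvALoop full l i ret =
        ret ++ List.replicate (l.takeWhile (· == '_')).length ' ' ++ l.dropWhile (· == '_') := by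
  intro l
  induction l with
  | nil => intro i ret _; simp [pvALoop]
  | cons c rest ih =>
    intro i ret hdrop
    by_cases hc : c = '_'
    · have hrest : full.drop (i + 1) = rest := by
        have := congrArg List.tail hdrop
        simpa [List.tail_drop] using this
      simp [pvALoop, hc, ih (i + 1) (ret ++ [' ']) hrest, List.replicate_succ]
    · simp [pvALoop, hc, hdrop]

lemma takeWhile_len (l : List Char) :
    (l.takeWhile (· == '_')).length = l.length - (l.dropWhile (· == '_')).length := by
  have h := List.takeWhile_append_dropWhile (p := (· == '_')) (l := l)
  have h2 := congrArg List.length h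
  rw [List.length_append] at h2
  omega

-- ===== VERDICT (by name: the statement is the Claim_ definition above) =====
theorem replace_starting_undesscore_py_spec : Claim_equal_replace_starting_undesscore_py := by
  intro s _
  unfold Spec_replace_starting_undesscore_py replace_starting_undesscore_py replace_starting_undesscore_py_alt
  rw [pvALoop_eq s.toList s.toList 0 [] (by simp), takeWhile_len]
  simp
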